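-- pv_equiv track=rewrite | github.com/whqhdtq12346/nonogram_solver | solver.py | _fill_line
-- ===== SOURCE A (Python) =====
-- def _fill_line(hint, line):
--     """모든 행과 열에 대해 교차점 알고리즘을 적용하여 확정되는 칸을 채운다."""
--     length = len(line)
--     if hint == [0]:
--         return [-1 for _ in range(length)]
--
--     if line == [-1]*length:
--         return line
--
--     # 시작 또는 끝 부분에 [0]으로 인해 사라진 line이 있을 경우 그 부분을 제외
--     start = 0
--     while line[start] == -1:
--         start += 1
--     end = length
--     while line[end-1] == -1:
--         end -= 1
--     length = end - start
--
--     require = sum(hint) + len(hint) - 1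
--     new_line = line[:]
--     if require <= length:
--         diff = length - require
--         for term in hint:
--             if term > diff:
--                 for i in range(start + diff, start + term):
--                     new_line[i] = 1
--             start += term + 1
--     return new_line
-- ===== SOURCE B (Python) =====
-- def _fill_line(hint, line):
--     n = len(line)
--     if hint == [0]:
--         return [-1] * n
--     new_line = line[:]
--     s = 0
--     while s < n and line[s] == -1:
--         s += 1
--     if s == n:
--         return new_line
--     e = n
--     while line[e - 1] == -1:
--         e -= 1
--     # leftmost placement: block m starts at ls[m]
--     ls = []
--     pos = s
--     for t in hint:
--         ls.append(pos)
--         pos += t + 1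
--     # rightmost placement: block m starts at rs[m], packed against the right window edge
--     rs = []
--     pos = e
--     for t in reversed(hint):
--         pos -= t
--         rs.append(pos)
--         pos -= 1
--     rs.reverse()
--     if rs and rs[0] < s:  # the blocks do not fit inside the window
--         return new_line
--     # a cell is certain iff it is covered by the same block in both extreme placements
--     for l0, r0, t in zip(ls, rs, hint):
--         for i in range(r0, l0 + t):
--             new_line[i] = 1
--     return new_line
-- ===== Notes on version B (the rewrite author's own statement) =====
-- stated objective: alternative
-- what changed: B replaces A's running-cursor fill with its slack arithmetic (diff = length - require, fill when term > diff) by the two-extreme-placements decomposition: a forward scan computes each block's leftmost start, a backward scan over the reversed hint computes each block's rightmost start, fit is checked as rs[0] >= window start, and each block fills the overlap range(rs[m], ls[m]+t) with no diff/require computation at all.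
import Mathlib
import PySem

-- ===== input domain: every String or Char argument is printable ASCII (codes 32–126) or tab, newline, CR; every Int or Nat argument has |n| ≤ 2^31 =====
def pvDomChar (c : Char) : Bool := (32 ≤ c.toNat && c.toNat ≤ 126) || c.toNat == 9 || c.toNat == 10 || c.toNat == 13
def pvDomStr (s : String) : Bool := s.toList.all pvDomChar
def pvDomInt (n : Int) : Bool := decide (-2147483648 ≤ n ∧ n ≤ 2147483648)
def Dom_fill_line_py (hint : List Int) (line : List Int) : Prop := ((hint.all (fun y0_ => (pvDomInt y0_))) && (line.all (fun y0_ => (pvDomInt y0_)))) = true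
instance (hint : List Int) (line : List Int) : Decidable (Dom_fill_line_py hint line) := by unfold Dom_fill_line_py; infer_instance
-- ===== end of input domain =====

-- B replaces A's slack/diff overlap arithmetic and running-cursor fill with the classic
-- two-extreme-placements decomposition: compute the leftmost and rightmost greedy placement
-- start of every block (forward scan and backward scan) and fill each block's overlap.


-- ===== PORT A =====
-- while line[start] == -1: start += 1   (unreachable out-of-range access would be pyGet? = none)
def pvFindStart (line : List Int) (i : Nat) : Nat :=
  match h : PySem.List.pyGet? line (i : Int) with
  | some v => if v = -1 then pvFindStart line (i + 1) else i
  | none => i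
termination_by line.length - i
decreasing_by
  simp only [PySem.List.pyGet?_natCast] at h
  obtain ⟨hlt, -⟩ := List.getElem?_eq_some_iff.mp h
  omega

-- while line[end-1] == -1: end -= 1
def pvFindEnd (line : List Int) : Nat → Nat
  | 0 => 0
  | (e + 1) =>
    match PySem.List.pyGet? line (e : Int) with
    | some v => if v = -1 then pvFindEnd line e else e + 1
    | none => e + 1

def fill_line_py (hint : List Int) (line : List Int) : List Int :=
  if hint = [0] then List.replicate line.length (-1)
  else if line = List.replicate line.length (-1) then line
  else
    let start := pvFindStart line 0
    let e := pvFindEnd line line.length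
    let len2 : Int := (e : Int) - (start : Int)
    let require : Int := hint.sum + hint.length - 1
    if require ≤ len2 then
      let diff := len2 - require
      -- new_line[i] = 1 : pySetD is exact while the index is in range, which Pre_ guarantees
      (hint.foldl
        (fun (st : List Int × Int) term =>
          (if term > diff then
             (PySem.List.pyRange (st.2 + diff) (st.2 + term) 1).foldl
               (fun nl i => PySem.List.pySetD nl i 1) st.1
           else st.1,
           st.2 + term + 1))
        (line, (start : Int))).1
    else line

-- ===== PORT B =====
-- while s < n and line[s] == -1: s += 1
def pvBFindS (xs : List Int) (i : Nat) : Nat :=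
  if h : i < xs.length then
    if xs[i]'h = -1 then pvBFindS xs (i + 1) else i
  else i
termination_by xs.length - i

-- while line[e-1] == -1: e -= 1  (same loop as in A's source)
def pvBFindE (line : List Int) : Nat → Nat
  | 0 => 0
  | (e + 1) =>
    match PySem.List.pyGet? line (e : Int) with
    | some v => if v = -1 then pvBFindE line e else e + 1
    | none => e + 1

def fill_line_py_alt (hint : List Int) (line : List Int) : List Int :=
  if hint = [0] then List.replicate line.length (-1)
  else
    let s := pvBFindS line 0
    if s = line.length then line
    else
      let e := pvBFindE line line.length
      -- ls = [] ; pos = s ; for t in hint: ls.append(pos); pos += t + 1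
      let ls := (hint.foldl
        (fun (st : List Int × Int) t => (st.1 ++ [st.2], st.2 + t + 1))
        (([], (s : Int)) : List Int × Int)).1
      -- rs = [] ; pos = e ; for t in reversed(hint): pos -= t; rs.append(pos); pos -= 1
      let rs := ((hint.reverse.foldl
        (fun (st : List Int × Int) t => (st.1 ++ [st.2 - t], st.2 - t - 1))
        (([], (e : Int)) : List Int × Int)).1).reverse
      -- if rs and rs[0] < s: return new_line
      if (match rs.head? with | some r0 => decide (r0 < (s : Int)) | none => false) then line
      else
        -- for l0, r0, t in zip(ls, rs, hint): for i in range(r0, l0 + t): new_line[i] = 1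
        ((ls.zip rs).zip hint).foldl
          (fun nl lrt =>
            (PySem.List.pyRange lrt.1.2 (lrt.1.1 + lrt.2) 1).foldl
              (fun nl i => PySem.List.pySetD nl i 1) nl)
          line

-- ===== PRECONDITION & SPEC =====
-- Pre_ holds exactly when Python A returns normally: either an early-out fires (hint [0],
-- an all-(-1) line, blocks that do not fit the trimmed window) or every block's overlap
-- write range(pos+diff, pos+term) stays inside Python's valid index range [-n, n) — outside
-- Pre_ both programs raise IndexError, which the total pySetD ports cannot mirror.
def Pre_fill_line_py (hint : List Int) (line : List Int) : Prop :=
  let n : Int := line.length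
  let s : Int := (line.takeWhile (fun x => x == -1)).length
  let e : Int := n - (line.reverse.takeWhile (fun x => x == -1)).length
  let req : Int := hint.sum + hint.length - 1
  let diff : Int := e - s - req
  hint = [0] ∨ line = List.replicate line.length (-1) ∨ e - s < req ∨
    ∀ m, m < hint.length → hint.getD m 0 > diff →
      (-n ≤ s + ((hint.take m).map (fun t => t + 1)).sum + diff ∧
        s + ((hint.take m).map (fun t => t + 1)).sum + hint.getD m 0 ≤ n)
instance (hint : List Int) (line : List Int) : Decidable (Pre_fill_line_py hint line) := by
  unfold Pre_fill_line_py; infer_instance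

def pvWitness_fill_line_py : List Int × List Int := ([2, 1], [0, 0, 0, 0, -1])

def Spec_fill_line_py (hint : List Int) (line : List Int) (out : List Int) : Prop := out = fill_line_py_alt hint line
instance (hint : List Int) (line : List Int) (out : List Int) : Decidable (Spec_fill_line_py hint line out) := by unfold Spec_fill_line_py; infer_instance

-- ===== CLAIM (what is proved, stated in full; the proofs are below) =====
def Claim_equal_fill_line_py : Prop := ∀ (hint : List Int) (line : List Int), Dom_fill_line_py hint line → Pre_fill_line_py hint line → Spec_fill_line_py hint line (fill_line_py hint line)

-- ===== LEMMAS AND PROOFS =====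

-- write 1 at every index of idxs (both filling loops reduce to this)
def pvSetOnes (xs : List Int) (idxs : List Int) : List Int :=
  idxs.foldl (fun nl i => PySem.List.pySetD nl i 1) xs

-- the index list A's filling loop writes
def pvIdxA (diff : Int) : List Int → Int → List Int
  | [], _ => []
  | t :: hs, pos =>
    (if t > diff then PySem.List.pyRange (pos + diff) (pos + t) 1 else []) ++
      pvIdxA diff hs (pos + t + 1)

-- start positions of the blocks when packed greedily from position pos
def pvLS : List Int → Int → List Int
  | [], _ => []
  | t :: hs, pos => pos :: pvLS hs (pos + t + 1)

-- B's backward scan (over the reversed hint), packing blocks against position pos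
def pvRSF : List Int → Int → List Int
  | [], _ => []
  | t :: r, pos => (pos - t) :: pvRSF r (pos - t - 1)

lemma pvFoldA_eq (diff : Int) :
    ∀ (hint : List Int) (nl : List Int) (pos : Int),
    (hint.foldl
      (fun (st : List Int × Int) term =>
        (if term > diff then
           (PySem.List.pyRange (st.2 + diff) (st.2 + term) 1).foldl
             (fun nl i => PySem.List.pySetD nl i 1) st.1
         else st.1, st.2 + term + 1)) (nl, pos)).1 = pvSetOnes nl (pvIdxA diff hint pos)
  | [], nl, pos => rfl
  | t :: hs, nl, pos => by
    simp only [List.foldl_cons, pvIdxA]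
    by_cases hc : t > diff
    · simp only [hc, if_pos]
      rw [pvFoldA_eq diff hs]
      simp [pvSetOnes, List.foldl_append]
    · simp only [hc, if_false]
      rw [pvFoldA_eq diff hs]
      simp [pvSetOnes]

lemma pvFoldLS : ∀ (hint acc : List Int) (pos : Int),
    (hint.foldl (fun (st : List Int × Int) t => (st.1 ++ [st.2], st.2 + t + 1)) (acc, pos))
      = (acc ++ pvLS hint pos, pos + hint.sum + hint.length)
  | [], acc, pos => by simp [pvLS]
  | t :: hs, acc, pos => by
    show (hs.foldl (fun (st : List Int × Int) t => (st.1 ++ [st.2], st.2 + t + 1))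
        (acc ++ [pos], pos + t + 1))
      = (acc ++ pvLS (t :: hs) pos, pos + (t :: hs).sum + ((t :: hs).length : Int))
    rw [pvFoldLS hs (acc ++ [pos]) (pos + t + 1)]
    simp only [pvLS, Prod.mk.injEq, List.append_assoc, List.singleton_append,
      List.sum_cons, List.length_cons]
    exact ⟨trivial, by push_cast; ring⟩

lemma pvFoldRS : ∀ (r acc : List Int) (pos : Int),
    (r.foldl (fun (st : List Int × Int) t => (st.1 ++ [st.2 - t], st.2 - t - 1)) (acc, pos))
      = (acc ++ pvRSF r pos, pos - r.sum - r.length)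
  | [], acc, pos => by simp [pvRSF]
  | t :: r, acc, pos => by
    show (r.foldl (fun (st : List Int × Int) t => (st.1 ++ [st.2 - t], st.2 - t - 1))
        (acc ++ [pos - t], pos - t - 1))
      = (acc ++ pvRSF (t :: r) pos, pos - (t :: r).sum - ((t :: r).length : Int))
    rw [pvFoldRS r (acc ++ [pos - t]) (pos - t - 1)]
    simp only [pvRSF, Prod.mk.injEq, List.append_assoc, List.singleton_append,
      List.sum_cons, List.length_cons]
    exact ⟨trivial, by push_cast; ring⟩

lemma pvLS_append : ∀ (hs : List Int) (t q : Int),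
    pvLS (hs ++ [t]) q = pvLS hs q ++ [q + hs.sum + hs.length]
  | [], t, q => by simp [pvLS]
  | t' :: hs', t, q => by
    simp only [List.cons_append, pvLS, pvLS_append hs' t (q + t' + 1), List.sum_cons,
      List.length_cons]
    rw [show q + t' + 1 + hs'.sum + (hs'.length : Int)
        = q + (t' + hs'.sum) + ((hs'.length : Int) + 1) from by ring]
    push_cast
    simp

lemma pvRSF_reverse (hs : List Int) : ∀ (pos : Int),
    (pvRSF hs.reverse pos).reverse = pvLS hs (pos - (hs.sum + (hs.length : Int) - 1)) := by
  induction hs using List.reverseRecOn with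
  | nil => intro pos; simp [pvRSF, pvLS]
  | append_singleton hs t ih =>
    intro pos
    rw [List.reverse_append, List.reverse_singleton]
    show (pvRSF (t :: hs.reverse) pos).reverse = _
    simp only [pvRSF, List.reverse_cons]
    rw [ih (pos - t - 1)]
    have hsum : (hs ++ [t]).sum = hs.sum + t := by simp
    have hlen : (((hs ++ [t]).length : Nat) : Int) = (hs.length : Int) + 1 := by
      simp [List.length_append]
    rw [pvLS_append hs t]
    rw [show pos - t - 1 - (hs.sum + (hs.length : Int) - 1)
        = pos - ((hs ++ [t]).sum + (((hs ++ [t]).length : Nat) : Int) - 1) from by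
      rw [hsum, hlen]; ring]
    rw [show pos - t
        = pos - ((hs ++ [t]).sum + (((hs ++ [t]).length : Nat) : Int) - 1)
          + hs.sum + (hs.length : Int) from by
      rw [hsum, hlen]; ring]

lemma pvZipFill (diff : Int) :
    ∀ (hint : List Int) (p : Int) (nl : List Int),
    ((((pvLS hint p).zip (pvLS hint (p + diff))).zip hint).foldl
      (fun nl lrt =>
        (PySem.List.pyRange lrt.1.2 (lrt.1.1 + lrt.2) 1).foldl
          (fun nl i => PySem.List.pySetD nl i 1) nl) nl)
      = pvSetOnes nl (pvIdxA diff hint p)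
  | [], p, nl => rfl
  | t :: hs, p, nl => by
    simp only [pvLS, List.zip_cons_cons, List.foldl_cons, pvIdxA]
    rw [show p + diff + t + 1 = p + t + 1 + diff from by ring]
    rw [pvZipFill diff hs (p + t + 1)]
    by_cases hc : t > diff
    · simp only [hc, if_pos]
      simp [pvSetOnes, List.foldl_append]
    · simp only [hc, if_false]
      rw [PySem.List.pyRange_one_eq_nil (by omega : p + t ≤ p + diff)]
      simp [pvSetOnes]

lemma pvBFindS_eq (xs : List Int) (i : Nat) : pvBFindS xs i = pvFindStart xs i := by
  rw [pvBFindS, pvFindStart]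
  by_cases h : i < xs.length
  · have hget : PySem.List.pyGet? xs (i : Int) = some (xs[i]'h) := by
      rw [PySem.List.pyGet?_natCast, List.getElem?_eq_getElem h]
    rw [dif_pos h, hget]
    by_cases hv : xs[i]'h = -1
    · simp only [hv, if_pos]
      exact pvBFindS_eq xs (i + 1)
    · simp [hv]
  · have hget : PySem.List.pyGet? xs (i : Int) = none := by
      rw [PySem.List.pyGet?_natCast, List.getElem?_eq_none_iff]
      omega
    rw [dif_neg h, hget]
termination_by xs.length - i
decreasing_by omega

lemma pvBFindE_eq (xs : List Int) : ∀ e, pvBFindE xs e = pvFindEnd xs e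
  | 0 => rfl
  | (e + 1) => by
    rw [pvBFindE, pvFindEnd]
    cases PySem.List.pyGet? xs (e : Int) with
    | none => rfl
    | some v =>
      by_cases hv : v = -1
      · simp only [hv, if_pos]
        exact pvBFindE_eq xs e
      · simp [hv]

lemma pvBFindS_all (xs : List Int) (i : Nat) (hall : pvBFindS xs i = xs.length) :
    ∀ j (hj : j < xs.length), i ≤ j → xs[j]'hj = -1 := by
  intro j hj hij
  rw [pvBFindS] at hall
  by_cases h : i < xs.length
  · rw [dif_pos h] at hall
    by_cases hv : xs[i]'h = -1
    · rw [if_pos hv] at hall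
      by_cases hji : j = i
      · subst hji; exact hv
      · exact pvBFindS_all xs (i + 1) hall j hj (by omega)
    · rw [if_neg hv] at hall
      omega
  · omega
termination_by xs.length - i
decreasing_by omega

lemma pvBFindS_full (xs : List Int) (i : Nat) (hi : i ≤ xs.length)
    (hall : ∀ j (hj : j < xs.length), xs[j]'hj = -1) : pvBFindS xs i = xs.length := by
  rw [pvBFindS]
  by_cases h : i < xs.length
  · rw [dif_pos h, if_pos (hall i h)]
    exact pvBFindS_full xs (i + 1) (by omega) hall
  · rw [dif_neg h]
    omega
termination_by xs.length - i
decreasing_by omega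

lemma pvBFindS_zero_iff (xs : List Int) :
    pvBFindS xs 0 = xs.length ↔ xs = List.replicate xs.length (-1) := by
  constructor
  · intro hall
    apply List.ext_getElem (by simp)
    intro j hj1 hj2
    rw [List.getElem_replicate]
    exact pvBFindS_all xs 0 hall j hj1 (Nat.zero_le j)
  · intro hrep
    apply pvBFindS_full xs 0 (Nat.zero_le _)
    intro j hj
    conv_lhs => rw [List.getElem_of_eq hrep]
    rw [List.getElem_replicate]

-- ===== VERDICT (by name: the statement is the Claim_ definition above) =====
theorem fill_line_py_spec : Claim_equal_fill_line_py := by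
  intro hint line hdom hpre
  unfold Spec_fill_line_py
  by_cases h0 : hint = [0]
  · simp [fill_line_py, fill_line_py_alt, h0]
  · simp only [fill_line_py, fill_line_py_alt, if_neg h0]
    rw [← pvBFindS_eq line 0, pvBFindE_eq line line.length]
    by_cases hrep : line = List.replicate line.length (-1)
    · rw [if_pos hrep, if_pos ((pvBFindS_zero_iff line).mpr hrep)]
    · rw [if_neg hrep, if_neg (fun h => hrep ((pvBFindS_zero_iff line).mp h))]
      set s := pvBFindS line 0 with hsdef
      set e := pvFindEnd line line.length with hedef
      rw [pvFoldRS hint.reverse [] (e : Int)]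
      simp only [List.nil_append]
      rw [pvRSF_reverse hint (e : Int)]
      rw [pvFoldLS hint [] (s : Int)]
      simp only [List.nil_append]
      cases hint with
      | nil =>
        simp only [pvLS, List.zip_nil_right, List.foldl_nil,
          List.head?_nil]
        -- (empty hint: both programs leave the line unchanged)
        split <;> rfl
      | cons t hs =>
        rw [show (e : Int) - ((t :: hs).sum + ((t :: hs).length : Int) - 1)
            = (s : Int) + ((e : Int) - (s : Int)
              - ((t :: hs).sum + ((t :: hs).length : Int) - 1)) from by ring]
        set diff : Int := (e : Int) - (s : Int)
          - ((t :: hs).sum + ((t :: hs).length : Int) - 1) with hdiffdef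
        by_cases hreq : (t :: hs).sum + ((t :: hs).length : Int) - 1
            ≤ (e : Int) - (s : Int)
        · rw [if_pos hreq]
          have hguard : (match (pvLS (t :: hs) ((s : Int) + diff)).head? with
              | some r0 => decide (r0 < (s : Int)) | none => false) = false := by
            simp only [pvLS, List.head?_cons]
            simp only [decide_eq_false_iff_not, not_lt]
            omega
          rw [hguard]
          simp only [Bool.false_eq_true, if_false]
          rw [pvZipFill diff (t :: hs) (s : Int) line]
          rw [pvFoldA_eq]
        · rw [if_neg hreq]
          have hguard : (match (pvLS (t :: hs) ((s : Int) + diff)).head? with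
              | some r0 => decide (r0 < (s : Int)) | none => false) = true := by
            simp only [pvLS, List.head?_cons]
            simp only [decide_eq_true_eq]
            omega
          rw [hguard]
          simp
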